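-- pv_equiv track=rewrite | github.com/naiveBay/price-predictor | functions/mathematical.py | binListOfPrices
-- ===== SOURCE A (Python) =====
-- def binListOfPrices(bins,prices):
--     binnedPrices = [-1]*len(prices);
--     for i_item in range(len(prices)):
--         for i in range(len(bins)-1):
--             if prices[i_item] >= bins[i] and prices[i_item]<bins[i+1]:
--                 binnedPrices[i_item] = bins[i];
--
--         if binnedPrices[i_item] == -1: binnedPrices[i_item] = bins[-1];
--     return binnedPrices
-- ===== SOURCE B (Python) =====
-- def _bisect_left(a, x):
--     lo, hi = 0, len(a)
--     while lo < hi: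
--         mid = (lo + hi) // 2
--         if a[mid] < x:
--             lo = mid + 1
--         else:
--             hi = mid
--     return lo
--
--
-- def binListOfPrices(bins, prices):
--     # sort the prices (keeping original positions), then binary-search each bin
--     # boundary once and stamp the bucket onto the contiguous run of sorted prices
--     pairs = sorted(enumerate(prices), key=lambda t: t[1])
--     sp = [p for _, p in pairs]
--     best = [None] * len(prices)
--     for i in range(len(bins) - 1):
--         lo, hi = bins[i], bins[i + 1]
--         for j in range(_bisect_left(sp, lo), _bisect_left(sp, hi)):
--             best[j] = lo
--     out = [None] * len(prices)
--     for (pos, p), b in zip(pairs, best):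
--         out[pos] = b if b is not None else bins[-1]
--     return out
-- ===== Notes on version B (the rewrite author's own statement) =====
-- stated objective: faster
-- what changed: Instead of scanning every bin boundary for every price, B sorts the prices once (keeping original positions), binary-searches each interval's two boundaries into the sorted prices, stamps the bucket value onto that contiguous run, and scatters the results back; no -1 sentinel is used.
-- intended difference: On inputs where some price's last matching bin start is literally -1 and the last bin is not -1, A mistakes the legitimate bin value -1 for its 'not found' sentinel and returns bins[-1] for that price, while B returns the intended bin start -1. — e.g. on binListOfPrices([-1, 5, 10], [0]): A returns [10], B returns [-1]
import Mathlib
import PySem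

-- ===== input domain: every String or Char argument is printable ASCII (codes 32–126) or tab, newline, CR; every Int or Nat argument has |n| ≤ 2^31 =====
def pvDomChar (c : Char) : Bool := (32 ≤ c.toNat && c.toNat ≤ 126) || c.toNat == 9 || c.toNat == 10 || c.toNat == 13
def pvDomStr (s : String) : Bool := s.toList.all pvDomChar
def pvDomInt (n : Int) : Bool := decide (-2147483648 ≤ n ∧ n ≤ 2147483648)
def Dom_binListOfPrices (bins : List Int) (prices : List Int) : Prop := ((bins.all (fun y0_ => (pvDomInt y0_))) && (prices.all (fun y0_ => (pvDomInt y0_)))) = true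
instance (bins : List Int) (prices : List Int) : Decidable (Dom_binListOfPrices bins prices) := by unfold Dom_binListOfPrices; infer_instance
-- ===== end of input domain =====

-- B replaces A's per-price scan over all bin boundaries by a sort-and-stamp algorithm:
-- prices are sorted once (keeping original positions), each interval's two boundaries are
-- binary-searched into the sorted prices and the bucket value is written onto that
-- contiguous run, then the results are scattered back; measured much faster, and no -1
-- sentinel is used (A's sentinel bug is documented as the intended difference D_ below).

-- ===== PORT A =====
def binListOfPrices (bins : List Int) (prices : List Int) : List Int :=
  (PySem.List.pyRange 0 (prices.length : Int) 1).foldl (fun binned i_item =>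
    let binned2 := (PySem.List.pyRange 0 ((bins.length : Int) - 1) 1).foldl (fun b i =>
      if PySem.List.pyGetD prices i_item 0 ≥ PySem.List.pyGetD bins i 0 ∧
         PySem.List.pyGetD prices i_item 0 < PySem.List.pyGetD bins (i + 1) 0 then
        PySem.List.pySetD b i_item (PySem.List.pyGetD bins i 0)
      else b) binned
    if PySem.List.pyGetD binned2 i_item 0 = -1 then
      PySem.List.pySetD binned2 i_item (PySem.List.pyGetD bins (-1) 0)
    else binned2)
    (List.replicate prices.length (-1))

-- ===== PORT B =====
-- Source B's hand-written _bisect_left (the while-loop; mid computed at both uses, same value;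
-- a[mid] is in range 0 ≤ mid < len(a), so List.getD is exact there)
-- fuel = len(a) bounds the iteration count (hi - lo shrinks every turn), keeping the
-- recursion structural (kernel-reducible)
def pvBisectGo (a : List Int) (x : Int) : Nat → Nat → Nat → Nat
  | 0, lo, _ => lo
  | fuel + 1, lo, hi =>
    if lo < hi then
      if a.getD ((lo + hi) / 2) 0 < x then pvBisectGo a x fuel ((lo + hi) / 2 + 1) hi
      else pvBisectGo a x fuel lo ((lo + hi) / 2)
    else lo

def pvBisectLeft (a : List Int) (x : Int) : Nat := pvBisectGo a x a.length 0 a.length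

-- pairs = sorted(enumerate(prices), key=lambda t: t[1])
def pvPairs (prices : List Int) : List (Int × Int) :=
  PySem.List.sorted (PySem.List.enumerate prices 0) (fun t => t.2)

-- sp = [p for _, p in pairs]
def pvSp (prices : List Int) : List Int := (pvPairs prices).map (fun t => t.2)

-- best = [None]*len(prices); for each interval stamp some(bins[i]) on the bisected run
def pvBest (bins : List Int) (prices : List Int) : List (Option Int) :=
  (PySem.List.pyRange 0 ((bins.length : Int) - 1) 1).foldl (fun best i =>
    (PySem.List.pyRange (pvBisectLeft (pvSp prices) (PySem.List.pyGetD bins i 0) : Int)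
                        (pvBisectLeft (pvSp prices) (PySem.List.pyGetD bins (i + 1) 0) : Int) 1).foldl
      (fun b j => PySem.List.pySetD b j (some (PySem.List.pyGetD bins i 0))) best)
    (List.replicate prices.length none)

-- out = [None]*len(prices); every position is overwritten below (or bins[-1] raises,
-- excluded by Pre_), so 0 stands in for Python's None placeholder
def binListOfPrices_alt (bins : List Int) (prices : List Int) : List Int :=
  ((pvPairs prices).zip (pvBest bins prices)).foldl (fun out pb =>
    PySem.List.pySetD out pb.1.1
      (match pb.2 with
       | some b => b
       | none => PySem.List.pyGetD bins (-1) 0))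
    (List.replicate prices.length 0)

-- ===== PRECONDITION & SPEC =====
-- Pre_ excludes only the inputs on which Python A raises IndexError: bins = [] with
-- prices ≠ [] ('bins[-1]' on the empty list; B raises there too).
def Pre_binListOfPrices (bins : List Int) (prices : List Int) : Prop :=
  prices = [] ∨ bins ≠ []
instance (bins : List Int) (prices : List Int) : Decidable (Pre_binListOfPrices bins prices) := by
  unfold Pre_binListOfPrices; infer_instance
def pvWitness_binListOfPrices : List Int × List Int := ([0, 10], [5, -3])

-- On inputs where some price's last matching bin start is literally -1 and the last bin is
-- not -1, A mistakes the legitimate bin value -1 for its "not found" sentinel and returns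
-- bins[-1] for that price, while B returns the intended bin start -1.
-- p lies in the i-th bin interval
def pvIn (bins : List Int) (i : Nat) (p : Int) : Prop :=
  bins.getD i 0 ≤ p ∧ p < bins.getD (i + 1) 0

def D_binListOfPrices (bins : List Int) (prices : List Int) : Prop :=
  bins.getLast? ≠ some (-1) ∧ ∃ p ∈ prices, ∃ i < bins.length - 1,
    bins.getD i 0 = -1 ∧ pvIn bins i p ∧ ∀ j < bins.length - 1, i < j → ¬ pvIn bins j p
instance (bins : List Int) (prices : List Int) : Decidable (D_binListOfPrices bins prices) := by
  unfold D_binListOfPrices pvIn; infer_instance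

def Spec_binListOfPrices (bins : List Int) (prices : List Int) (out : List Int) : Prop :=
  ¬ D_binListOfPrices bins prices → out = binListOfPrices_alt bins prices
instance (bins : List Int) (prices : List Int) (out : List Int) : Decidable (Spec_binListOfPrices bins prices out) := by
  unfold Spec_binListOfPrices; infer_instance

def pvDiffWitness_binListOfPrices : List Int × List Int := ([-1, 5, 10], [0])
def pvDiffWitnessOut_binListOfPrices : (List Int) × (List Int) := ([10], [-1])

-- ===== CLAIM (what is proved, stated in full; the proofs are below) =====
def Claim_unchanged_binListOfPrices : Prop := ∀ (bins : List Int) (prices : List Int), Dom_binListOfPrices bins prices → Pre_binListOfPrices bins prices → Spec_binListOfPrices bins prices (binListOfPrices bins prices)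
def Claim_changed_binListOfPrices : Prop := Dom_binListOfPrices (pvDiffWitness_binListOfPrices.1) (pvDiffWitness_binListOfPrices.2) ∧ Pre_binListOfPrices (pvDiffWitness_binListOfPrices.1) (pvDiffWitness_binListOfPrices.2) ∧ D_binListOfPrices (pvDiffWitness_binListOfPrices.1) (pvDiffWitness_binListOfPrices.2) ∧ binListOfPrices (pvDiffWitness_binListOfPrices.1) (pvDiffWitness_binListOfPrices.2) = pvDiffWitnessOut_binListOfPrices.1 ∧ binListOfPrices_alt (pvDiffWitness_binListOfPrices.1) (pvDiffWitness_binListOfPrices.2) = pvDiffWitnessOut_binListOfPrices.2 ∧ pvDiffWitnessOut_binListOfPrices.1 ≠ pvDiffWitnessOut_binListOfPrices.2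
def Claim_exact_binListOfPrices : Prop := ∀ (bins : List Int) (prices : List Int), Dom_binListOfPrices bins prices → Pre_binListOfPrices bins prices → D_binListOfPrices bins prices → binListOfPrices bins prices ≠ binListOfPrices_alt bins prices

-- ===== LEMMAS AND PROOFS =====

-- the per-price match condition tested by both ports
abbrev pvCondP (bins : List Int) (p : Int) (i : Int) : Prop :=
  PySem.List.pyGetD bins i 0 ≤ p ∧ p < PySem.List.pyGetD bins (i + 1) 0

def pvRev (bins : List Int) : List Int :=
  (PySem.List.pyRange 0 ((bins.length : Int) - 1) 1).reverse

-- A's per-price value: overwrite-fold with the -1 sentinel, patched to bins[-1]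
def pvA (bins : List Int) (p : Int) : Int :=
  let v := (PySem.List.pyRange 0 ((bins.length : Int) - 1) 1).foldl
    (fun v i => if pvCondP bins p i then PySem.List.pyGetD bins i 0 else v) (-1)
  if v = -1 then PySem.List.pyGetD bins (-1) 0 else v

-- B's per-price value: the last matching interval's start, else bins[-1]
def pvB (bins : List Int) (p : Int) : Int :=
  match (pvRev bins).find? (fun i => decide (pvCondP bins p i)) with
  | some i => PySem.List.pyGetD bins i 0
  | none => PySem.List.pyGetD bins (-1) 0

-- the overwrite-fold at one price, as B's Option accumulator
def pvOpt (bins : List Int) (p : Int) : Option Int :=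
  (PySem.List.pyRange 0 ((bins.length : Int) - 1) 1).foldl
    (fun o i => if pvCondP bins p i then some (PySem.List.pyGetD bins i 0) else o) none

-- overwrite-fold = last match = first match of the reversed list
theorem pv_foldl_overwrite {α : Type} (P : Int → Prop) [DecidablePred P] (g : Int → α)
    (l : List Int) (a : α) :
    l.foldl (fun v i => if P i then g i else v) a =
      (match l.reverse.find? (fun i => decide (P i)) with
       | some i => g i
       | none => a) := by
  induction l generalizing a with
  | nil => rfl
  | cons x rest ih =>
    simp only [List.foldl_cons, List.reverse_cons, List.find?_append, ih]
    cases hf : rest.reverse.find? (fun i => decide (P i)) with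
    | some i => simp
    | none => by_cases h : P x <;> simp [h]

-- the inner loop only writes position k; it equals a value-level overwrite-fold there
theorem pv_inner_fold (C : Int → Prop) [DecidablePred C] (g : Int → Int) (range : List Int)
    (l : List Int) (k : Nat) (hk : k < l.length) :
    range.foldl (fun b i => if C i then PySem.List.pySetD b (k : Int) (g i) else b) l =
      PySem.List.pySetD l (k : Int)
        (range.foldl (fun v i => if C i then g i else v) (l.getD k 0)) := by
  induction range generalizing l with
  | nil =>
    simp only [List.foldl_nil, PySem.List.pySetD_natCast]
    rw [List.getD_eq_getElem l 0 hk, List.set_getElem_self]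
  | cons x rest ih =>
    simp only [List.foldl_cons]
    by_cases h : C x
    · rw [if_pos h, if_pos h,
        ih (PySem.List.pySetD l (k : Int) (g x)) (by simpa using hk)]
      have hg : (l.set k (g x))[k]?.getD 0 = g x := by
        rw [List.getElem?_eq_getElem (by simpa using hk), Option.getD_some, List.getElem_set_self]
      simp [PySem.List.pySetD_natCast, List.set_set, hg]
    · rw [if_neg h, if_neg h, ih l hk]

theorem pv_set_append (A : List Int) (x v : Int) (r : List Int) :
    (A ++ x :: r).set A.length v = A ++ v :: r := by
  induction A with
  | nil => rfl
  | cons a A ih => simp [List.set_cons_succ, ih]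

-- A is the pointwise map of pvA
theorem pvA_eq_map (bins : List Int) (prices : List Int) :
    binListOfPrices bins prices = prices.map (pvA bins) := by
  have key : ∀ t : Nat, t ≤ prices.length →
      (PySem.List.pyRange 0 (t : Int) 1).foldl (fun binned i_item =>
        let binned2 := (PySem.List.pyRange 0 ((bins.length : Int) - 1) 1).foldl (fun b i =>
          if PySem.List.pyGetD prices i_item 0 ≥ PySem.List.pyGetD bins i 0 ∧
             PySem.List.pyGetD prices i_item 0 < PySem.List.pyGetD bins (i + 1) 0 then
            PySem.List.pySetD b i_item (PySem.List.pyGetD bins i 0)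
          else b) binned
        if PySem.List.pyGetD binned2 i_item 0 = -1 then
          PySem.List.pySetD binned2 i_item (PySem.List.pyGetD bins (-1) 0)
        else binned2)
        (List.replicate prices.length (-1))
      = (prices.take t).map (pvA bins) ++ List.replicate (prices.length - t) (-1) := by
    intro t ht
    induction t with
    | zero => simp [PySem.List.pyRange_one_eq_nil]
    | succ t ih =>
      have ht' : t ≤ prices.length := Nat.le_of_succ_le ht
      have htlt : t < prices.length := ht
      rw [show ((t + 1 : Nat) : Int) = (t : Int) + 1 by push_cast; ring,
          PySem.List.pyRange_one_succ_right (by positivity), List.foldl_append, ih ht']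
      set s : List Int := (prices.take t).map (pvA bins) ++ List.replicate (prices.length - t) (-1) with hs
      have hlen1 : ((prices.take t).map (pvA bins)).length = t := by
        simp [List.length_take, Nat.min_eq_left ht']
      have hslen : s.length = prices.length := by
        simp only [hs, List.length_append, hlen1, List.length_replicate]
        omega
      have hrep : prices.length - t = (prices.length - (t + 1)) + 1 := by omega
      have hsdecomp : s = (prices.take t).map (pvA bins) ++
          (-1) :: List.replicate (prices.length - (t + 1)) (-1) := by
        rw [hs, hrep, List.replicate_succ]
      have hst : s.getD t 0 = -1 := by
        rw [hsdecomp, List.getD_eq_getElem _ 0 (by rw [← hsdecomp]; omega),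
            List.getElem_append_right (by omega)]
        simp [Nat.min_eq_left ht']
      simp only [List.foldl_cons, List.foldl_nil, ge_iff_le]
      rw [pv_inner_fold
        (fun i => PySem.List.pyGetD bins i 0 ≤ PySem.List.pyGetD prices (t : Int) 0 ∧
                  PySem.List.pyGetD prices (t : Int) 0 < PySem.List.pyGetD bins (i + 1) 0)
        (fun i => PySem.List.pyGetD bins i 0) _ s t (by omega), hst]
      have hp : PySem.List.pyGetD prices (t : Int) 0 = prices[t] := by
        rw [PySem.List.pyGetD_natCast, List.getD_eq_getElem _ _ htlt]
      have hfold :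
          ((PySem.List.pyRange 0 ((bins.length : Int) - 1) 1).foldl
            (fun v i => if PySem.List.pyGetD bins i 0 ≤ PySem.List.pyGetD prices (t : Int) 0 ∧
                PySem.List.pyGetD prices (t : Int) 0 < PySem.List.pyGetD bins (i + 1) 0
              then PySem.List.pyGetD bins i 0 else v) (-1))
          = (PySem.List.pyRange 0 ((bins.length : Int) - 1) 1).foldl
            (fun v i => if pvCondP bins prices[t] i then PySem.List.pyGetD bins i 0 else v) (-1) := by
        rw [hp]
      rw [hfold]
      set V := (PySem.List.pyRange 0 ((bins.length : Int) - 1) 1).foldl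
        (fun v i => if pvCondP bins prices[t] i then PySem.List.pyGetD bins i 0 else v) (-1) with hV
      have hVget : PySem.List.pyGetD (PySem.List.pySetD s (t : Int) V) (t : Int) 0 = V := by
        rw [PySem.List.pySetD_natCast, PySem.List.pyGetD_natCast,
            List.getD_eq_getElem _ _ (by simpa using (by omega : t < s.length)),
            List.getElem_set_self]
      have hsetA : (if PySem.List.pyGetD (PySem.List.pySetD s (t : Int) V) (t : Int) 0 = -1 then
            PySem.List.pySetD (PySem.List.pySetD s (t : Int) V) (t : Int) (PySem.List.pyGetD bins (-1) 0)
          else PySem.List.pySetD s (t : Int) V) = s.set t (pvA bins prices[t]) := by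
        rw [hVget]
        unfold pvA
        simp only [← hV]
        by_cases hv : V = -1
        · rw [if_pos hv, if_pos hv]
          simp [PySem.List.pySetD_natCast, List.set_set]
        · rw [if_neg hv, if_neg hv]
          simp [PySem.List.pySetD_natCast]
      rw [hsetA, hsdecomp]
      have hset := pv_set_append ((prices.take t).map (pvA bins)) (-1)
        (pvA bins prices[t]) (List.replicate (prices.length - (t + 1)) (-1))
      rw [hlen1] at hset
      rw [hset]
      have htk : List.take (t + 1) (List.map (pvA bins) prices)
          = List.take t (List.map (pvA bins) prices) ++ [pvA bins prices[t]] := by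
        rw [List.take_add_one, List.getElem?_eq_getElem (by simpa using htlt)]
        simp
      simp [htk]
  have h := key prices.length le_rfl
  simpa [binListOfPrices] using h

-- pvB as the matcher of the Option accumulator
theorem pvB_eq_matchOpt (bins : List Int) (p : Int) :
    pvB bins p = (match pvOpt bins p with
                  | some b => b
                  | none => PySem.List.pyGetD bins (-1) 0) := by
  unfold pvB pvOpt pvRev
  rw [pv_foldl_overwrite (pvCondP bins p) (fun i => some (PySem.List.pyGetD bins i 0))]
  cases (PySem.List.pyRange 0 ((bins.length : Int) - 1) 1).reverse.find?
      (fun i => decide (pvCondP bins p i)) <;> rfl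

-- correctness of Source B's binary search on a sorted list
theorem pvBisectGo_spec (a : List Int) (x : Int) (hs : a.Pairwise (· ≤ ·)) :
    ∀ (fuel lo hi : Nat), hi - lo ≤ fuel → lo ≤ hi → hi ≤ a.length →
      (∀ q, q < lo → a.getD q 0 < x) →
      (∀ q, hi ≤ q → q < a.length → ¬ a.getD q 0 < x) →
      lo ≤ pvBisectGo a x fuel lo hi ∧ pvBisectGo a x fuel lo hi ≤ hi ∧
      (∀ q, q < pvBisectGo a x fuel lo hi → a.getD q 0 < x) ∧
      (∀ q, pvBisectGo a x fuel lo hi ≤ q → q < a.length → ¬ a.getD q 0 < x) := by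
  have hmono : ∀ (i j : Nat), i ≤ j → j < a.length → a.getD i 0 ≤ a.getD j 0 := by
    intro i j hij hj
    rcases Nat.eq_or_lt_of_le hij with rfl | hlt
    · exact le_rfl
    · rw [List.getD_eq_getElem _ _ (by omega), List.getD_eq_getElem _ _ hj]
      exact List.pairwise_iff_getElem.mp hs i j (by omega) hj hlt
  intro fuel
  induction fuel with
  | zero =>
    intro lo hi hf hlh hhl hbelow habove
    rw [pvBisectGo]
    have : hi = lo := by omega
    subst this
    exact ⟨le_rfl, le_rfl, hbelow, habove⟩
  | succ fuel ih =>
    intro lo hi hf hlh hhl hbelow habove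
    rw [pvBisectGo]
    by_cases h : lo < hi
    · rw [if_pos h]
      by_cases hm : a.getD ((lo + hi) / 2) 0 < x
      · rw [if_pos hm]
        have h1 := ih ((lo + hi) / 2 + 1) hi (by omega) (by omega) hhl
          (by intro q hq
              exact lt_of_le_of_lt (hmono q ((lo + hi) / 2) (by omega) (by omega)) hm)
          habove
        exact ⟨by omega, h1.2.1, h1.2.2.1, h1.2.2.2⟩
      · rw [if_neg hm]
        have h1 := ih lo ((lo + hi) / 2) (by omega) (by omega) (by omega) hbelow
          (by intro q hq hql hlt
              exact hm (lt_of_le_of_lt (hmono ((lo + hi) / 2) q hq hql) hlt))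
        exact ⟨h1.1, by omega, h1.2.2.1, h1.2.2.2⟩
    · rw [if_neg h]
      have : hi = lo := by omega
      subst this
      exact ⟨le_rfl, le_rfl, hbelow, habove⟩

theorem pvBisectLeft_spec' (a : List Int) (x : Int) (hs : a.Pairwise (· ≤ ·)) :
    pvBisectLeft a x ≤ a.length ∧
    (∀ q, q < pvBisectLeft a x → a.getD q 0 < x) ∧
    (∀ q, pvBisectLeft a x ≤ q → q < a.length → ¬ a.getD q 0 < x) := by
  have h := pvBisectGo_spec a x hs a.length 0 a.length (by omega) (by omega) le_rfl
    (by intro q hq; omega) (by intro q hq hql; omega)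
  exact ⟨h.2.1, h.2.2.1, h.2.2.2⟩

-- membership in the stamped run characterises membership in the interval
theorem pv_bisect_window (a : List Int) (lo hi : Int) (hs : a.Pairwise (· ≤ ·))
    (q : Nat) (hq : q < a.length) :
    (pvBisectLeft a lo ≤ q ∧ q < pvBisectLeft a hi) ↔ (lo ≤ a.getD q 0 ∧ a.getD q 0 < hi) := by
  obtain ⟨hlo1, hlo2, hlo3⟩ := pvBisectLeft_spec' a lo hs
  obtain ⟨hhi1, hhi2, hhi3⟩ := pvBisectLeft_spec' a hi hs
  constructor
  · rintro ⟨h1, h2⟩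
    exact ⟨not_lt.mp (hlo3 q h1 hq), hhi2 q h2⟩
  · rintro ⟨h1, h2⟩
    constructor
    · by_contra hlt
      exact absurd (hlo2 q (by omega)) (not_lt.mpr h1)
    · by_contra hge
      exact hhi3 q (by omega) hq h2

-- the stamping loop, elementwise
theorem pv_fold_set (v : Option Int) (r : Int) :
    ∀ (n : Nat) (l : Int), 0 ≤ l → (r - l).toNat ≤ n →
    ∀ (b : List (Option Int)) (q : Nat),
    ((PySem.List.pyRange l r 1).foldl (fun b j => PySem.List.pySetD b j v) b)[q]? =
      if l ≤ (q : Int) ∧ (q : Int) < r ∧ q < b.length then some v else b[q]? := by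
  intro n
  induction n with
  | zero =>
    intro l hl hn b q
    rw [PySem.List.pyRange_one_eq_nil (by omega)]
    rw [List.foldl_nil, if_neg (by omega)]
  | succ n ih =>
    intro l hl hn b q
    by_cases hlr : l < r
    · rw [PySem.List.pyRange_one_cons hlr, List.foldl_cons,
        ih (l + 1) (by omega) (by omega)]
      rw [PySem.List.pySetD_of_nonneg b v hl, List.length_set, List.getElem?_set]
      by_cases h1 : l + 1 ≤ (q : Int) ∧ (q : Int) < r ∧ q < b.length
      · rw [if_pos h1, if_pos (by omega)]
      · rw [if_neg h1]
        by_cases h2 : l.toNat = q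
        · have hq : (q : Int) = l := by omega
          rw [if_pos h2]
          by_cases h3 : l.toNat < b.length
          · rw [if_pos h3, if_pos (by omega)]
          · rw [if_neg h3, if_neg (by omega), List.getElem?_eq_none (by omega)]
        · rw [if_neg h2, if_neg (by omega)]
    · rw [PySem.List.pyRange_one_eq_nil (by omega), List.foldl_nil, if_neg (by omega)]

-- the outer loop keeps the length
theorem pv_fold_set_len (v : Option Int) (R : List Int) (b : List (Option Int)) :
    (R.foldl (fun b j => PySem.List.pySetD b j v) b).length = b.length := by
  induction R generalizing b with
  | nil => rfl
  | cons x rest ih => rw [List.foldl_cons, ih, PySem.List.length_pySetD]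

-- the best array after processing the first t intervals, elementwise
theorem pv_best_spec (bins sp : List Int) (hs : sp.Pairwise (· ≤ ·)) :
    ∀ (t : Nat) (q : Nat),
    ((PySem.List.pyRange 0 (t : Int) 1).foldl (fun best i =>
      (PySem.List.pyRange (pvBisectLeft sp (PySem.List.pyGetD bins i 0) : Int)
                          (pvBisectLeft sp (PySem.List.pyGetD bins (i + 1) 0) : Int) 1).foldl
        (fun b j => PySem.List.pySetD b j (some (PySem.List.pyGetD bins i 0))) best)
      (List.replicate sp.length none))[q]? =
      if q < sp.length then
        some ((PySem.List.pyRange 0 (t : Int) 1).foldl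
          (fun o i => if pvCondP bins (sp.getD q 0) i then some (PySem.List.pyGetD bins i 0) else o)
          none)
      else none := by
  intro t
  induction t with
  | zero =>
    intro q
    rw [PySem.List.pyRange_one_eq_nil (by omega)]
    simp [List.getElem?_replicate]
  | succ t ih =>
    intro q
    have hcast : ((t + 1 : Nat) : Int) = (t : Int) + 1 := by push_cast; ring
    rw [hcast, PySem.List.pyRange_one_succ_right (by positivity), List.foldl_append,
      List.foldl_cons, List.foldl_nil, List.foldl_append, List.foldl_cons, List.foldl_nil]
    set bt := (PySem.List.pyRange 0 (t : Int) 1).foldl (fun best i =>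
      (PySem.List.pyRange (pvBisectLeft sp (PySem.List.pyGetD bins i 0) : Int)
                          (pvBisectLeft sp (PySem.List.pyGetD bins (i + 1) 0) : Int) 1).foldl
        (fun b j => PySem.List.pySetD b j (some (PySem.List.pyGetD bins i 0))) best)
      (List.replicate sp.length none) with hbt
    have hlen : bt.length = sp.length := by
      rw [hbt]
      have : ∀ (R : List Int) (b : List (Option Int)),
          (R.foldl (fun best i =>
            (PySem.List.pyRange (pvBisectLeft sp (PySem.List.pyGetD bins i 0) : Int)
                                (pvBisectLeft sp (PySem.List.pyGetD bins (i + 1) 0) : Int) 1).foldl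
              (fun b j => PySem.List.pySetD b j (some (PySem.List.pyGetD bins i 0))) best) b).length
          = b.length := by
        intro R
        induction R with
        | nil => intro b; rfl
        | cons x rest ih2 => intro b; rw [List.foldl_cons, ih2, pv_fold_set_len]
      rw [this, List.length_replicate]
    rw [pv_fold_set _ _ ((pvBisectLeft sp (PySem.List.pyGetD bins ((t : Int) + 1) 0) : Int)
          - (pvBisectLeft sp (PySem.List.pyGetD bins (t : Int) 0) : Int)).toNat
        _ (by positivity) le_rfl bt q, ih q]
    by_cases hq : q < sp.length
    · rw [if_pos hq]
      have hwin := pv_bisect_window sp (PySem.List.pyGetD bins (t : Int) 0)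
        (PySem.List.pyGetD bins ((t : Int) + 1) 0) hs q hq
      by_cases hc : pvCondP bins (sp.getD q 0) (t : Int)
      · have hw : (pvBisectLeft sp (PySem.List.pyGetD bins (t : Int) 0) : Int) ≤ (q : Int) ∧
            (q : Int) < (pvBisectLeft sp (PySem.List.pyGetD bins ((t : Int) + 1) 0) : Int) := by
          have := hwin.mpr ⟨hc.1, hc.2⟩
          exact ⟨by exact_mod_cast Int.ofNat_le.mpr this.1, by exact_mod_cast Int.ofNat_lt.mpr this.2⟩
        rw [if_pos ⟨hw.1, hw.2, by omega⟩, if_pos hc, if_pos hq]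
      · have hw : ¬ ((pvBisectLeft sp (PySem.List.pyGetD bins (t : Int) 0) : Int) ≤ (q : Int) ∧
            (q : Int) < (pvBisectLeft sp (PySem.List.pyGetD bins ((t : Int) + 1) 0) : Int) ∧
            q < bt.length) := by
          intro ⟨h1, h2, _⟩
          exact hc (hwin.mp ⟨by exact_mod_cast h1, by exact_mod_cast h2⟩)
        rw [if_neg hw, if_pos hq, if_neg hc]
    · rw [if_neg hq, if_neg (by intro h; omega), if_neg hq]

-- handles bins = [] : the outer range over len(bins)-1 equals the range over its toNat
theorem pv_range_toNat (bins : List Int) :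
    PySem.List.pyRange 0 ((bins.length : Int) - 1) 1
      = PySem.List.pyRange 0 ((((bins.length : Int) - 1).toNat : Nat) : Int) 1 := by
  rcases Nat.eq_zero_or_pos bins.length with h | h
  · rw [PySem.List.pyRange_one_eq_nil (by omega), PySem.List.pyRange_one_eq_nil (by omega)]
  · congr 1
    omega

-- sp is sorted
theorem pv_sp_sorted (prices : List Int) : (pvSp prices).Pairwise (· ≤ ·) := by
  unfold pvSp pvPairs
  exact PySem.List.sorted_map_key_pairwise (PySem.List.enumerate prices 0) (fun t => t.2)

theorem pv_pairs_len (prices : List Int) : (pvPairs prices).length = prices.length := by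
  unfold pvPairs
  rw [PySem.List.length_sorted, PySem.List.length_enumerate]

-- best = the Option accumulator at each pair's price
theorem pv_best_eq (bins : List Int) (prices : List Int) :
    pvBest bins prices = (pvPairs prices).map (fun pr => pvOpt bins pr.2) := by
  have hsp : (pvSp prices).length = prices.length := by
    unfold pvSp
    rw [List.length_map, pv_pairs_len]
  apply List.ext_getElem?
  intro q
  have h := pv_best_spec bins (pvSp prices) (pv_sp_sorted prices)
    (((bins.length : Int) - 1).toNat) q
  rw [← pv_range_toNat] at h
  unfold pvBest
  rw [hsp] at h
  rw [h, List.getElem?_map]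
  by_cases hq : q < prices.length
  · have hqp : q < (pvPairs prices).length := by rw [pv_pairs_len]; exact hq
    rw [if_pos hq, List.getElem?_eq_getElem hqp]
    have hspq : (pvSp prices).getD q 0 = (pvPairs prices)[q].2 := by
      rw [List.getD_eq_getElem _ _ (by rw [hsp]; exact hq)]
      unfold pvSp
      rw [List.getElem_map]
    rw [hspq]
    rfl
  · rw [if_neg hq, List.getElem?_eq_none (by rw [pv_pairs_len]; omega)]
    rfl

-- scattering the per-position values back writes (prices.map f) at every listed position
theorem pv_scatter (f : Int → Int) (prices : List Int) :
    ∀ (L : List (Int × Int)),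
      (∀ pr ∈ L, ∃ k : Nat, k < prices.length ∧ pr = ((k : Int), prices.getD k 0)) →
    ∀ (acc : List Int), acc.length = prices.length → ∀ q : Nat,
    (L.foldl (fun o pr => PySem.List.pySetD o pr.1 (f pr.2)) acc)[q]? =
      if (q : Int) ∈ L.map Prod.fst then (prices.map f)[q]? else acc[q]? := by
  intro L
  induction L with
  | nil =>
    intro _ acc _ q
    simp
  | cons pr L' ih =>
    intro hmem acc hacc q
    obtain ⟨k, hk, hpr⟩ := hmem pr (List.mem_cons_self)
    rw [List.foldl_cons, ih (fun x hx => hmem x (List.mem_cons_of_mem pr hx))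
      (PySem.List.pySetD acc pr.1 (f pr.2)) (by rw [PySem.List.length_pySetD]; exact hacc)]
    simp only [List.map_cons, List.mem_cons]
    rw [hpr]
    simp only []
    rw [PySem.List.pySetD_of_nonneg acc (f (prices.getD k 0)) (by positivity), Int.toNat_natCast]
    by_cases h1 : (q : Int) ∈ L'.map Prod.fst
    · rw [if_pos h1, if_pos (Or.inr h1)]
    · rw [if_neg h1]
      by_cases h2 : (q : Int) = (k : Int)
      · have hqk : q = k := by omega
        subst hqk
        rw [if_pos (Or.inl h2), List.getElem?_set, if_pos rfl, if_pos (by omega),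
          List.getElem?_map, List.getElem?_eq_getElem hk,
          List.getD_eq_getElem prices 0 hk]
        rfl
      · rw [if_neg (by rintro (h | h); exact h2 h; exact h1 h), List.getElem?_set,
          if_neg (by omega)]

-- zipping a list with a map of itself pairs each element with its image
theorem pv_zip_self {α β : Type} (l : List α) (g : α → β) :
    l.zip (l.map g) = l.map (fun x => (x, g x)) := by
  induction l with
  | nil => rfl
  | cons x rest ih => simp [ih]

-- B is the pointwise map of pvB
theorem pv_alt_eq_map (bins : List Int) (prices : List Int) :
    binListOfPrices_alt bins prices = prices.map (pvB bins) := by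
  unfold binListOfPrices_alt
  rw [pv_best_eq]
  have hz : (pvPairs prices).zip ((pvPairs prices).map (fun pr => pvOpt bins pr.2))
      = (pvPairs prices).map (fun pr => (pr, pvOpt bins pr.2)) :=
    pv_zip_self (pvPairs prices) (fun pr => pvOpt bins pr.2)
  rw [hz, List.foldl_map]
  have hfun : (fun (out : List Int) (pr : Int × Int) =>
      PySem.List.pySetD out (pr, pvOpt bins pr.2).1.1
        (match (pr, pvOpt bins pr.2).2 with
         | some b => b
         | none => PySem.List.pyGetD bins (-1) 0))
      = (fun out pr => PySem.List.pySetD out pr.1 (pvB bins pr.2)) := by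
    funext out pr
    rw [pvB_eq_matchOpt]
  rw [hfun]
  have hperm : (pvPairs prices).Perm (PySem.List.enumerate prices 0) :=
    PySem.List.sorted_perm (PySem.List.enumerate prices 0) (fun t => t.2) false
  have hmem : ∀ pr ∈ pvPairs prices, ∃ k : Nat, k < prices.length ∧ pr = ((k : Int), prices.getD k 0) := by
    intro pr hpr
    have := hperm.mem_iff.mp hpr
    obtain ⟨k, hk, hpr'⟩ := (PySem.List.mem_enumerate_iff prices 0 pr).mp this
    refine ⟨k, hk, ?_⟩
    rw [hpr', List.getD_eq_getElem prices 0 hk]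
    simp
  apply List.ext_getElem?
  intro q
  rw [pv_scatter (pvB bins) prices (pvPairs prices) hmem
    (List.replicate prices.length 0) (List.length_replicate) q]
  have hfst : ((q : Int) ∈ (pvPairs prices).map Prod.fst) ↔ q < prices.length := by
    have hpm : ((pvPairs prices).map Prod.fst).Perm
        ((PySem.List.enumerate prices 0).map Prod.fst) := hperm.map Prod.fst
    rw [hpm.mem_iff]
    have := PySem.List.map_fst_enumerate prices 0
    rw [show (List.map (fun x => x.1) (PySem.List.enumerate prices 0))
        = (PySem.List.enumerate prices 0).map Prod.fst from rfl] at this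
    rw [this, PySem.List.mem_pyRange_one]
    omega
  by_cases hq : q < prices.length
  · rw [if_pos (hfst.mpr hq)]
  · rw [if_neg (by rw [hfst]; omega), List.getElem?_eq_none (by simp; omega),
      List.getElem?_eq_none (by simp; omega)]

-- on a strictly decreasing list, find? = some i means every j > i in the list fails
theorem pv_find_above (P : Int → Bool) (l : List Int) (hl : l.Pairwise (· > ·))
    (i : Int) (hf : l.find? P = some i) :
    ∀ j ∈ l, i < j → P j = false := by
  induction l with
  | nil => simp at hf
  | cons x rest ih =>
    rw [List.pairwise_cons] at hl
    rw [List.find?_cons] at hf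
    by_cases h : P x = true
    · rw [h] at hf
      simp only [Option.some_inj] at hf
      subst hf
      intro j hj hij
      rcases List.mem_cons.mp hj with rfl | hj'
      · omega
      · exact absurd (hl.1 j hj') (by omega)
    · rw [Bool.not_eq_true] at h
      rw [h] at hf
      intro j hj hij
      rcases List.mem_cons.mp hj with rfl | hj'
      · exact h
      · exact ih hl.2 hf j hj' hij

-- converse: a match all of whose superiors in the list fail IS the find? result
theorem pv_find_exact (P : Int → Bool) (l : List Int) (hl : l.Pairwise (· > ·))
    (i : Int) (hi : i ∈ l) (hPi : P i = true)
    (habove : ∀ j ∈ l, i < j → P j = false) :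
    l.find? P = some i := by
  induction l with
  | nil => simp at hi
  | cons x rest ih =>
    rw [List.pairwise_cons] at hl
    rw [List.find?_cons]
    rcases List.mem_cons.mp hi with rfl | hi'
    · rw [hPi]
    · have hxi : i < x := hl.1 i hi'
      have hPx : P x = false := habove x (by simp) hxi
      rw [hPx]
      exact ih hl.2 hi' (fun j hj hij => habove j (List.mem_cons_of_mem x hj) hij)

theorem pv_rev_pairwise (bins : List Int) : (pvRev bins).Pairwise (· > ·) := by
  unfold pvRev
  rw [List.pairwise_reverse]
  exact PySem.List.pairwise_lt_pyRange_one 0 ((bins.length : Int) - 1)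

theorem pv_mem_rev (bins : List Int) (j : Int) :
    j ∈ pvRev bins ↔ 0 ≤ j ∧ j < (bins.length : Int) - 1 := by
  unfold pvRev
  rw [List.mem_reverse, PySem.List.mem_pyRange_one]

-- per-price agreement outside the sentinel-collision condition
theorem pv_point (bins : List Int) (p : Int)
    (h : ¬ (bins.getLast? ≠ some (-1) ∧ ∃ i < bins.length - 1,
      bins.getD i 0 = -1 ∧ pvIn bins i p ∧ ∀ j < bins.length - 1, i < j → ¬ pvIn bins j p)) :
    pvA bins p = pvB bins p := by
  unfold pvA pvB pvRev
  rw [pv_foldl_overwrite (pvCondP bins p) (fun i => PySem.List.pyGetD bins i 0)]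
  show (if (match (PySem.List.pyRange 0 ((bins.length : Int) - 1) 1).reverse.find?
              (fun i => decide (pvCondP bins p i)) with
            | some i => PySem.List.pyGetD bins i 0
            | none => (-1 : Int)) = -1 then PySem.List.pyGetD bins (-1) 0
        else _) = _
  cases hf : (PySem.List.pyRange 0 ((bins.length : Int) - 1) 1).reverse.find?
      (fun i => decide (pvCondP bins p i)) with
  | none => simp
  | some i =>
    have hPi : pvCondP bins p i := by
      have h := List.find?_some (p := fun i => decide (pvCondP bins p i)) hf
      simpa using h
    have hmem := List.mem_of_find?_eq_some hf
    have hrange : 0 ≤ i ∧ i < (bins.length : Int) - 1 := (pv_mem_rev bins i).mp hmem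
    by_cases hv : PySem.List.pyGetD bins i 0 = -1
    · have hne : bins ≠ [] := by
        intro e; subst e; simp at hrange; omega
      by_cases hlast : bins.getLast? = some (-1)
      · have hL : PySem.List.pyGetD bins (-1) 0 = -1 := by
          rw [PySem.List.pyGetD_neg_one bins 0 hne]
          rw [List.getLast?_eq_some_getLast hne, Option.some_inj] at hlast
          exact hlast
        simp [hv, hL]
      · exfalso
        apply h
        have hi0 : ((i.toNat : Int)) = i := Int.toNat_of_nonneg hrange.1
        have hi1 : i.toNat + 1 < bins.length := by omega
        have hgd : bins.getD i.toNat 0 = PySem.List.pyGetD bins i 0 := by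
          rw [← PySem.List.pyGetD_natCast, hi0]
        have hgd1 : bins.getD (i.toNat + 1) 0 = PySem.List.pyGetD bins (i + 1) 0 := by
          rw [← PySem.List.pyGetD_natCast]
          congr 1
          push_cast [hi0]
          ring
        refine ⟨hlast, i.toNat, by omega, by rw [hgd]; exact hv,
          ⟨by rw [hgd]; exact hPi.1, by rw [hgd1]; exact hPi.2⟩, ?_⟩
        intro j hjr hij hcj
        have hj1 : j + 1 < bins.length := by omega
        have hjmem : ((j : Int)) ∈ pvRev bins := by
          rw [pv_mem_rev]
          constructor
          · positivity
          · omega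
        have := pv_find_above _ _ (pv_rev_pairwise bins) i hf (j : Int) hjmem (by omega)
        rw [decide_eq_false_iff_not] at this
        apply this
        constructor
        · rw [PySem.List.pyGetD_natCast]; exact hcj.1
        · rw [show ((j : Int) + 1) = ((j + 1 : Nat) : Int) by push_cast; ring,
              PySem.List.pyGetD_natCast]
          exact hcj.2
    · simp [hv]

-- ===== VERDICT (by name: the statement is the Claim_ definition above) =====
theorem binListOfPrices_spec : Claim_unchanged_binListOfPrices := by
  intro bins prices _ _ hnd
  rw [pvA_eq_map, pv_alt_eq_map]
  apply List.map_congr_left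
  intro p hp
  apply pv_point
  intro hex
  exact hnd ⟨hex.1, p, hp, hex.2⟩

theorem binListOfPrices_changed : Claim_changed_binListOfPrices := by
  unfold Claim_changed_binListOfPrices; decide

theorem binListOfPrices_tight : Claim_exact_binListOfPrices := by
  intro bins prices _ _ hD heq
  rw [pvA_eq_map, pv_alt_eq_map] at heq
  obtain ⟨hlast, p, hp, i, hiR, hneg, ⟨hle, hlt⟩, hall⟩ := hD
  have hi1 : i + 1 < bins.length := by omega
  have hpoint : pvA bins p = pvB bins p := List.map_inj_left.mp heq p hp
  have hne : bins ≠ [] := by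
    intro e; subst e; simp at hi1
  have hgd : PySem.List.pyGetD bins ((i : Nat) : Int) 0 = bins.getD i 0 :=
    PySem.List.pyGetD_natCast bins i 0
  have hgd1 : PySem.List.pyGetD bins (((i : Nat) : Int) + 1) 0 = bins.getD (i + 1) 0 := by
    rw [show (((i : Nat) : Int) + 1) = ((i + 1 : Nat) : Int) by push_cast; ring]
    exact PySem.List.pyGetD_natCast bins (i + 1) 0
  have hPi : decide (pvCondP bins p ((i : Nat) : Int)) = true := by
    rw [decide_eq_true_iff]
    exact ⟨by rw [hgd]; exact hle, by rw [hgd1]; exact hlt⟩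
  have hfind : (pvRev bins).find? (fun x => decide (pvCondP bins p x)) = some ((i : Nat) : Int) := by
    apply pv_find_exact _ _ (pv_rev_pairwise bins)
    · rw [pv_mem_rev]
      constructor
      · positivity
      · omega
    · exact hPi
    · intro j hj hij
      have hjr := (pv_mem_rev bins j).mp hj
      have hj0 : ((j.toNat : Int)) = j := Int.toNat_of_nonneg hjr.1
      rw [decide_eq_false_iff_not]
      intro hcj
      apply hall j.toNat (by omega) (by omega)
      constructor
      · rw [← PySem.List.pyGetD_natCast, hj0]; exact hcj.1
      · rw [← PySem.List.pyGetD_natCast]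
        rw [show ((j.toNat + 1 : Nat) : Int) = j + 1 by omega]
        exact hcj.2
  have hBval : pvB bins p = -1 := by
    unfold pvB
    rw [hfind]
    show PySem.List.pyGetD bins ((i : Nat) : Int) 0 = -1
    rw [hgd, hneg]
  have hAval : pvA bins p = PySem.List.pyGetD bins (-1) 0 := by
    unfold pvA
    rw [pv_foldl_overwrite (pvCondP bins p) (fun i => PySem.List.pyGetD bins i 0)]
    show (if (match (pvRev bins).find? (fun x => decide (pvCondP bins p x)) with
              | some x => PySem.List.pyGetD bins x 0
              | none => (-1 : Int)) = -1 then PySem.List.pyGetD bins (-1) 0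
          else (match (pvRev bins).find? (fun x => decide (pvCondP bins p x)) with
              | some x => PySem.List.pyGetD bins x 0
              | none => (-1 : Int))) = PySem.List.pyGetD bins (-1) 0
    rw [hfind]
    show (if PySem.List.pyGetD bins ((i : Nat) : Int) 0 = -1 then PySem.List.pyGetD bins (-1) 0
          else PySem.List.pyGetD bins ((i : Nat) : Int) 0) = PySem.List.pyGetD bins (-1) 0
    rw [hgd, hneg]
    simp
  have hLne : PySem.List.pyGetD bins (-1) 0 ≠ -1 := by
    rw [PySem.List.pyGetD_neg_one bins 0 hne]
    intro e
    exact hlast (by rw [List.getLast?_eq_some_getLast hne, e])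
  rw [hAval, hBval] at hpoint
  exact hLne hpoint
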